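-- pv_equiv track=rewrite | github.com/Dai-Wenxun/Pointer-Generator-Networks | data_utils.py | article2ids
-- ===== SOURCE A (Python) =====
-- def article2ids(article_words, token2idx, unknown_idx):
--     ids = []
--     oovs = []
--     for w in article_words:
--         i = token2idx.get(w, unknown_idx)
--         if i == unknown_idx:
--             if w not in oovs:
--                 oovs.append(w)
--             oov_num = oovs.index(w)
--             ids.append(len(token2idx) + oov_num)
--         else:
--             ids.append(i)
--     return ids, oovs
-- ===== SOURCE B (Python) =====
-- def article2ids(article_words, token2idx, unknown_idx):
--     # pass 1: collect unique OOV words in first-seen order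
--     oovs = []
--     for w in article_words:
--         if token2idx.get(w, unknown_idx) == unknown_idx and w not in oovs:
--             oovs.append(w)
--     # index the OOVs once, then map every word in a second pass
--     oov_index = {w: j for j, w in enumerate(oovs)}
--     vocab_size = len(token2idx)
--     ids = []
--     for w in article_words:
--         i = token2idx.get(w, unknown_idx)
--         ids.append(vocab_size + oov_index[w] if i == unknown_idx else i)
--     return ids, oovs
-- ===== Notes on version B (the rewrite author's own statement) =====
-- stated objective: faster
-- what changed: A interleaves everything in one loop, rescanning the growing oov list with 'in' and 'index' for every OOV occurrence; B collects the unique OOV words in a first pass, builds a {word: position} dict once, and maps every word to its id in a second pass with O(1) lookups.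
import Mathlib
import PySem

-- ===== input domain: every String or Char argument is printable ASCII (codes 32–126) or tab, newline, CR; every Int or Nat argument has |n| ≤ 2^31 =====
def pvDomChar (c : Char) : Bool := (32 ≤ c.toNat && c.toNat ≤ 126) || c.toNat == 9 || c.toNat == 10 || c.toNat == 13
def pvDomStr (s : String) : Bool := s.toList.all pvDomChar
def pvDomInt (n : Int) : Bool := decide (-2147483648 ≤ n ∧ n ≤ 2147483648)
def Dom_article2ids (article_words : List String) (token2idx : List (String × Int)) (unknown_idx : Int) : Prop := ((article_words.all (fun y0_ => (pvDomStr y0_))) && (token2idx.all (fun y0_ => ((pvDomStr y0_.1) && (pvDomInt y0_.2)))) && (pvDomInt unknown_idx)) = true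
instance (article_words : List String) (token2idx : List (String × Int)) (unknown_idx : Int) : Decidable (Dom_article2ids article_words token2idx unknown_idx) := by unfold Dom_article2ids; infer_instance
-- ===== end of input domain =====

-- B replaces A's single loop (which rescans the growing oov list with `in`/`index` per word)
-- by two passes: first collect the unique OOV words, index them once in a dict, then map every
-- word to its id.  Objective: alternative decomposition; return value identical.

-- ===== PORT A =====
def article2ids (article_words : List String) (token2idx : List (String × Int)) (unknown_idx : Int) : List Int × List String :=
  article_words.foldl
    (fun st w =>
      let i := (PySem.Dict.mk token2idx).getD w unknown_idx
      if i == unknown_idx then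
        let oovs := if !(st.2.contains w) then st.2 ++ [w] else st.2
        -- oovs.index(w): w was just ensured to be a member, so the ValueError arm is dead; getD 0 never fires
        let oov_num : Int := ((PySem.List.index? oovs w).getD 0 : Nat)
        (st.1 ++ [(token2idx.length : Int) + oov_num], oovs)
      else
        (st.1 ++ [i], st.2))
    (([], []) : List Int × List String)

-- ===== PORT B =====
def article2ids_alt (article_words : List String) (token2idx : List (String × Int)) (unknown_idx : Int) : List Int × List String :=
  let oovs := article_words.foldl
    (fun oovs w =>
      if ((PySem.Dict.mk token2idx).getD w unknown_idx == unknown_idx) && !(oovs.contains w)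
      then oovs ++ [w] else oovs) []
  let oovIndex : PySem.Dict String Int :=
    PySem.Dict.mk ((PySem.List.enumerate oovs).map (fun p => (p.2, p.1)))
  let vocabSize : Int := token2idx.length
  let ids := article_words.foldl
    (fun ids w =>
      let i := (PySem.Dict.mk token2idx).getD w unknown_idx
      -- oov_index[w]: every OOV word is a key of oovIndex, so the KeyError arm is dead; getD 0 never fires
      ids ++ [if i == unknown_idx then vocabSize + oovIndex.getD w 0 else i]) []
  (ids, oovs)

-- ===== PRECONDITION & SPEC =====
def Spec_article2ids (article_words : List String) (token2idx : List (String × Int)) (unknown_idx : Int) (out : List Int × List String) : Prop := out = article2ids_alt article_words token2idx unknown_idx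
instance (article_words : List String) (token2idx : List (String × Int)) (unknown_idx : Int) (out : List Int × List String) : Decidable (Spec_article2ids article_words token2idx unknown_idx out) := by unfold Spec_article2ids; infer_instance

-- ===== CLAIM (what is proved, stated in full; the proofs are below) =====
def Claim_equal_article2ids : Prop := ∀ (article_words : List String) (token2idx : List (String × Int)) (unknown_idx : Int), Dom_article2ids article_words token2idx unknown_idx → Spec_article2ids article_words token2idx unknown_idx (article2ids article_words token2idx unknown_idx)

-- ===== LEMMAS AND PROOFS =====

-- B's first-pass step (definitionally the lambda in article2ids_alt)
def bstep (token2idx : List (String × Int)) (unknown_idx : Int) (oovs : List String) (w : String) : List String :=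
  if ((PySem.Dict.mk token2idx).getD w unknown_idx == unknown_idx) && !(oovs.contains w)
  then oovs ++ [w] else oovs

-- A's step (definitionally the lambda in article2ids)
def astep (token2idx : List (String × Int)) (unknown_idx : Int) (st : List Int × List String) (w : String) : List Int × List String :=
  let i := (PySem.Dict.mk token2idx).getD w unknown_idx
  if i == unknown_idx then
    let oovs := if !(st.2.contains w) then st.2 ++ [w] else st.2
    let oov_num : Int := ((PySem.List.index? oovs w).getD 0 : Nat)
    (st.1 ++ [(token2idx.length : Int) + oov_num], oovs)
  else
    (st.1 ++ [i], st.2)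

-- id of a word relative to a fixed final oov list F
def wid (token2idx : List (String × Int)) (unknown_idx : Int) (F : List String) (w : String) : Int :=
  let i := (PySem.Dict.mk token2idx).getD w unknown_idx
  if i == unknown_idx then (token2idx.length : Int) + ((PySem.List.index? F w).getD 0 : Nat) else i

lemma article2ids_eq_foldl (aw : List String) (t : List (String × Int)) (u : Int) :
    article2ids aw t u = aw.foldl (astep t u) ([], []) := rfl

lemma bstep_prefix (aw : List String) (t : List (String × Int)) (u : Int) :
    ∀ oovs : List String, oovs <+: aw.foldl (bstep t u) oovs := by
  induction aw with
  | nil => intro oovs; simp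
  | cons w aw ih =>
    intro oovs
    refine List.IsPrefix.trans ?_ (ih (bstep t u oovs w))
    unfold bstep
    split
    · exact ⟨[w], rfl⟩
    · exact List.prefix_refl _

lemma getD_oovIndex (F : List String) (s : Int) (w : String) :
    (PySem.Dict.mk ((PySem.List.enumerate F s).map (fun p => (p.2, p.1)))).get? w
      = (PySem.List.index? F w).map (fun n : Nat => s + (n : Int)) := by
  induction F generalizing s with
  | nil => simp [PySem.List.enumerate, PySem.List.index?, PySem.Dict.get?]
  | cons x F ih =>
    rw [PySem.List.enumerate_cons]
    simp only [List.map_cons]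
    rw [PySem.Dict.get?_mk_cons]
    by_cases h : x = w
    · subst h
      rw [PySem.List.index?_cons_self]
      simp
    · rw [PySem.List.index?_cons_of_ne F h]
      simp only [beq_iff_eq, h, if_false]
      rw [ih (s + 1)]
      cases PySem.List.index? F w with
      | none => simp
      | some k => simp; omega

-- the main invariant: A's loop, run from any state whose oov list develops inside F,
-- produces B's per-word ids relative to F and B's first-pass oov list
lemma main_inv (aw : List String) (t : List (String × Int)) (u : Int) :
    ∀ (ids : List Int) (oovs F : List String),
      (aw.foldl (bstep t u) oovs) <+: F →
      aw.foldl (astep t u) (ids, oovs) = (ids ++ aw.map (wid t u F), aw.foldl (bstep t u) oovs) := by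
  induction aw with
  | nil => intro ids oovs F _; simp
  | cons w aw ih =>
    intro ids oovs F hF
    simp only [List.foldl_cons, List.map_cons]
    have hstep : astep t u (ids, oovs) w = (ids ++ [wid t u F w], bstep t u oovs w) := by
      unfold astep bstep wid
      simp only
      by_cases hi : (PySem.Dict.mk t).getD w u == u
      · simp only [hi, if_true, Bool.true_and]
        have hmem : w ∈ (if !(oovs.contains w) then oovs ++ [w] else oovs) := by
          by_cases hc : w ∈ oovs <;> simp [hc]
        have hpre : (if !(oovs.contains w) then oovs ++ [w] else oovs) <+: F := by
          refine List.IsPrefix.trans ?_ hF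
          have : bstep t u oovs w = (if !(oovs.contains w) then oovs ++ [w] else oovs) := by
            unfold bstep; simp [hi]
          rw [List.foldl_cons, this]
          exact bstep_prefix aw t u _
        obtain ⟨tl, htl⟩ := hpre
        have hidx : PySem.List.index? (if !(oovs.contains w) then oovs ++ [w] else oovs) w
            = PySem.List.index? F w := by
          rw [← htl, PySem.List.index?_append_of_mem tl hmem]
        rw [hidx]
      · simp [hi]
    rw [hstep]
    rw [ih (ids ++ [wid t u F w]) (bstep t u oovs w) F (by simpa using hF)]
    simp

lemma mem_bstep_foldl (aw : List String) (t : List (String × Int)) (u : Int) :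
    ∀ (oovs : List String) (w : String), w ∈ aw →
      ((PySem.Dict.mk t).getD w u == u) = true → w ∈ aw.foldl (bstep t u) oovs := by
  induction aw with
  | nil => intro _ _ h; simp at h
  | cons x aw ih =>
    intro oovs w hw hi
    rw [List.foldl_cons]
    rcases List.mem_cons.1 hw with h | h
    · subst h
      have hx : w ∈ bstep t u oovs w := by
        unfold bstep
        by_cases hc : w ∈ oovs <;> simp [hi, hc]
      exact (bstep_prefix aw t u (bstep t u oovs w)).subset hx
    · exact ih (bstep t u oovs x) w h hi

lemma alt_ids (aw : List String) (t : List (String × Int)) (u : Int) :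
    article2ids_alt aw t u
      = (aw.map (wid t u (aw.foldl (bstep t u) [])), aw.foldl (bstep t u) []) := by
  have h1 : article2ids_alt aw t u =
      (aw.foldl
        (fun ids w => ids ++
          [if ((PySem.Dict.mk t).getD w u == u) then
              (t.length : Int) +
                (PySem.Dict.mk ((PySem.List.enumerate (aw.foldl (bstep t u) [])).map
                  (fun p => (p.2, p.1)))).getD w 0
            else (PySem.Dict.mk t).getD w u]) [],
       aw.foldl (bstep t u) []) := rfl
  rw [h1]
  congr 1
  rw [PySem.List.foldl_append_singleton_eq_map, List.nil_append]
  apply List.map_congr_left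
  intro w hw
  unfold wid
  simp only
  by_cases hi : (PySem.Dict.mk t).getD w u == u
  · simp only [hi, if_true]
    congr 1
    rw [PySem.Dict.getD_eq_get?_getD, getD_oovIndex]
    have hmem : w ∈ aw.foldl (bstep t u) [] := mem_bstep_foldl aw t u [] w hw hi
    obtain ⟨k, hk⟩ := Option.isSome_iff_exists.1 ((PySem.List.index?_isSome_iff _ _).2 hmem)
    rw [hk]
    simp
  · simp [hi]

-- ===== VERDICT (by name: the statement is the Claim_ definition above) =====
theorem article2ids_spec : Claim_equal_article2ids := by
  intro aw t u _
  unfold Spec_article2ids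
  rw [article2ids_eq_foldl,
      main_inv aw t u [] [] (aw.foldl (bstep t u) []) (List.prefix_refl _),
      alt_ids aw t u]
  simp
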